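-- pv_equiv track=rewrite | github.com/Duran-Calpoly/lab7_202_spring26 | lab7_1.py | heapify_down
-- ===== SOURCE A (Python) =====
-- def heapify_down(heap: list[int], index: int) -> list[int]:
--     new_heap = heap[:]
--     left = 2 * index + 1
--     right = 2 * index + 2
--     size = len(new_heap)
--
--     if left >= size:
--         return new_heap
--
--     smallest = left
--
--     if right < size and new_heap[right] < new_heap[left]:
--         smallest = right
--
--     if new_heap[smallest] < new_heap[index]:
--         temp = new_heap[index]
--         new_heap[index] = new_heap[smallest]
--         new_heap[smallest] = temp
--         return heapify_down(new_heap, smallest)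
--
--     return new_heap
-- ===== SOURCE B (Python) =====
-- def heapify_down(heap: list[int], index: int) -> list[int]:
--     new_heap = heap[:]
--     size = len(new_heap)
--     i = index
--     while True:
--         left = 2 * i + 1
--         if left >= size:
--             return new_heap
--         right = left + 1
--         smallest = left
--         if right < size and new_heap[right] < new_heap[left]:
--             smallest = right
--         if new_heap[smallest] >= new_heap[i]:
--             return new_heap
--         new_heap[i], new_heap[smallest] = new_heap[smallest], new_heap[i]
--         i = smallest
-- ===== Notes on version B (the rewrite author's own statement) =====
-- stated objective: alternative
-- what changed: Replaces A's recursion, which copies the whole list at every sift-down level, with a single copy followed by an iterative swap loop mutating that copy in place.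
-- outside the precondition, e.g. on heapify_down([3, 1, 2], -1): A returns [3, 1, 2], B returns [3, 1, 2]
import Mathlib
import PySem

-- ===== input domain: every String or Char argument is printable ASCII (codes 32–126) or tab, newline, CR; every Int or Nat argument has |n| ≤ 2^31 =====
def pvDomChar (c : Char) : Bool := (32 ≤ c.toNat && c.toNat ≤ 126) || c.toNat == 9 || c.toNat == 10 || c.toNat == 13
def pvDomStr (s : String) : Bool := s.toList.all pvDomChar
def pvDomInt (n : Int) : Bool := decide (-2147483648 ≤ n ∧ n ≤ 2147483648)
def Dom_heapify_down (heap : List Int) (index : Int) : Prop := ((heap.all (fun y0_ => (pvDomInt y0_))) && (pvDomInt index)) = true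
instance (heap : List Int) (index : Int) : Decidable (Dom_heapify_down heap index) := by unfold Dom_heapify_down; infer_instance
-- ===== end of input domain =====

-- B replaces A's recursion (which copies the list at every level) by a single copy followed
-- by an iterative sift-down loop mutating that copy in place; objective: alternative.

-- ===== PORT A =====
-- A recurses on `smallest`; within Pre_ the recursion depth is < heap.length, so
-- fuel heap.length + 1 is enough (fuel is only a totality guard).
def heapifyDownRecA : Nat → List Int → Int → List Int
  | 0, heap, _ => heap
  | fuel + 1, heap, index =>
    let new_heap := PySem.List.slice heap none none   -- heap[:]
    let left := 2 * index + 1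
    let right := 2 * index + 2
    let size : Int := new_heap.length
    if left ≥ size then new_heap
    else
      let smallest := left
      let smallest :=
        if right < size ∧ PySem.List.pyGetD new_heap right 0 < PySem.List.pyGetD new_heap left 0
        then right else smallest
      if PySem.List.pyGetD new_heap smallest 0 < PySem.List.pyGetD new_heap index 0 then
        let temp := PySem.List.pyGetD new_heap index 0
        let h1 := PySem.List.pySetD new_heap index (PySem.List.pyGetD new_heap smallest 0)
        let h2 := PySem.List.pySetD h1 smallest temp
        heapifyDownRecA fuel h2 smallest
      else new_heap

def heapify_down (heap : List Int) (index : Int) : List Int :=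
  heapifyDownRecA (heap.length + 1) heap index

-- ===== PORT B =====
-- the `while True` loop of Source B, carrying (new_heap, size, i); fuel is the totality guard
def heapifyDownLoopB : Nat → List Int → Int → Int → List Int
  | 0, new_heap, _, _ => new_heap
  | fuel + 1, new_heap, size, i =>
    let left := 2 * i + 1
    if left ≥ size then new_heap
    else
      let right := left + 1
      let smallest :=
        if right < size ∧ PySem.List.pyGetD new_heap right 0 < PySem.List.pyGetD new_heap left 0
        then right else left
      if PySem.List.pyGetD new_heap smallest 0 ≥ PySem.List.pyGetD new_heap i 0 then new_heap
      else
        -- new_heap[i], new_heap[smallest] = new_heap[smallest], new_heap[i]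
        let vi := PySem.List.pyGetD new_heap i 0
        let vs := PySem.List.pyGetD new_heap smallest 0
        heapifyDownLoopB fuel (PySem.List.pySetD (PySem.List.pySetD new_heap i vs) smallest vi)
          size smallest

def heapify_down_alt (heap : List Int) (index : Int) : List Int :=
  let new_heap := PySem.List.slice heap none none   -- heap[:]
  heapifyDownLoopB (heap.length + 1) new_heap new_heap.length index

-- ===== PRECONDITION & SPEC =====
-- Pre_ excludes negative indices: there A's element accesses go through Python's accidental
-- negative-index wraparound and the recursion may raise IndexError (e.g. heap=[1,2], index=-2).
def Pre_heapify_down (heap : List Int) (index : Int) : Prop := 0 ≤ index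
instance (heap : List Int) (index : Int) : Decidable (Pre_heapify_down heap index) := by
  unfold Pre_heapify_down; infer_instance

def pvWitness_heapify_down : List Int × Int := ([5, 1, 2, 3], 0)

def Spec_heapify_down (heap : List Int) (index : Int) (out : List Int) : Prop := out = heapify_down_alt heap index
instance (heap : List Int) (index : Int) (out : List Int) : Decidable (Spec_heapify_down heap index out) := by unfold Spec_heapify_down; infer_instance

-- ===== CLAIM (what is proved, stated in full; the proofs are below) =====
def Claim_equal_heapify_down : Prop := ∀ (heap : List Int) (index : Int), Dom_heapify_down heap index → Pre_heapify_down heap index → Spec_heapify_down heap index (heapify_down heap index)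

-- ===== LEMMAS AND PROOFS =====

-- at every level A's recursion and B's loop compute the same state; B carries
-- size = new_heap.length, which the swap preserves (length_pySetD)
theorem heapifyDownRecA_eq_loop (fuel : Nat) :
    ∀ (h : List Int) (i : Int), heapifyDownRecA fuel h i = heapifyDownLoopB fuel h h.length i := by
  induction fuel with
  | zero => intro h i; rfl
  | succ fuel ih =>
    intro h i
    simp only [heapifyDownRecA, heapifyDownLoopB, PySem.List.slice_none_none]
    have hr : (2 : Int) * i + 2 = 2 * i + 1 + 1 := by ring
    rw [hr]
    split_ifs with h1 h2 h3 h4 h5 h6 <;>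
      first
        | rfl
        | omega
        | (rw [ih]; simp [PySem.List.length_pySetD])

theorem heapify_down_spec_raw (heap : List Int) (index : Int) :
    heapify_down heap index = heapify_down_alt heap index := by
  unfold heapify_down heapify_down_alt
  simp only [PySem.List.slice_none_none]
  exact heapifyDownRecA_eq_loop (heap.length + 1) heap index

-- ===== VERDICT (by name: the statement is the Claim_ definition above) =====
theorem heapify_down_spec : Claim_equal_heapify_down := by
  intro heap index _ _
  unfold Spec_heapify_down
  exact heapify_down_spec_raw heap index
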